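-- pv_equiv track=rewrite | github.com/QuanjunZhang/APCARepresentation | bases/base_graph_formatter.py | normalize_node_id
-- ===== SOURCE A (Python) =====
-- def normalize_node_id(src_edges, dst_edges, node_features):
--     """
--     One of the key problem is that after you get the nodes by
--     different edge type, the node id is not sequential anymore. We need
--     to normalize it back to 0 to len(total number of nodes)
--     :param src_edges: Src Node
--     :param dst_edges: Dest Node
--     :param node_features: Node Features
--     :return: Return the norm_src, norm_dst and norm_feats
--     """
--     normalized_dict = dict()
--     norm_src = []
--     norm_dst = []
--     norm_feat = dict()
--     for node_id in src_edges:
--         if node_id not in normalized_dict: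
--             normalized_dict[node_id] = len(normalized_dict)
--         norm_src.append(normalized_dict[node_id])
--
--     for node_id in dst_edges:
--         if node_id not in normalized_dict:
--             normalized_dict[node_id] = len(normalized_dict)
--         norm_dst.append(normalized_dict[node_id])
--
--     for key, value in node_features.items():
--         norm_feat[normalized_dict[int(key)]] = value
--
--     return norm_src, norm_dst, norm_feat
-- ===== SOURCE B (Python) =====
-- def normalize_node_id(src_edges, dst_edges, node_features):
--     # Sort-then-rank: record each node's first-occurrence index by a reverse
--     # overwrite scan, then rank the nodes by sorting on that index.
--     chain = src_edges + dst_edges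
--     first = {}
--     for i in range(len(chain) - 1, -1, -1):
--         first[chain[i]] = i  # last write wins = first occurrence
--     rank = {n: r for r, n in enumerate(sorted(first, key=first.get))}
--     norm_src = [rank[n] for n in src_edges]
--     norm_dst = [rank[n] for n in dst_edges]
--     norm_feat = {rank[int(k)]: v for k, v in node_features.items()}
--     return norm_src, norm_dst, norm_feat
-- ===== Notes on version B (the rewrite author's own statement) =====
-- stated objective: alternative
-- what changed: Replaces A's incremental dict-growing numbering (counter assigned while emitting output) with a sort-then-rank scheme: a reverse overwrite scan records each node's first-occurrence index, ranks come from sorting the nodes on that index, then three lookup-only passes remap.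
import Mathlib
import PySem

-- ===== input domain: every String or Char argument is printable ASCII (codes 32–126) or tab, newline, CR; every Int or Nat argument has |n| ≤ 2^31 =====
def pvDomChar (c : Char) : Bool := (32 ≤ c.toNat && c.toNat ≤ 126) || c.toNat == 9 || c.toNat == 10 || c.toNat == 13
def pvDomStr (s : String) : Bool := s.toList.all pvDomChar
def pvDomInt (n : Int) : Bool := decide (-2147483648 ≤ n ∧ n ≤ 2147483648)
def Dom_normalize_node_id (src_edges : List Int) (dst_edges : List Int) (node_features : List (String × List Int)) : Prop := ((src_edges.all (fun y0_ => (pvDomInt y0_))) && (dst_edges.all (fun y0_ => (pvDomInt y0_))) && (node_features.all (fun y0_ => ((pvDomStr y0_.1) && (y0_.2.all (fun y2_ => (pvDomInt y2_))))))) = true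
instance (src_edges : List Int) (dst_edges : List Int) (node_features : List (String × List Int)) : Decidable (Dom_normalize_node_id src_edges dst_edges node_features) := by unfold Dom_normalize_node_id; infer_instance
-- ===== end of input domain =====

-- B replaces A's incremental dict-growing numbering by a sort-then-rank scheme: a reverse
-- overwrite scan records each node's first-occurrence index, nodes are ranked by sorting on
-- that index, then three lookup-only passes remap (objective: alternative algorithm).

-- ===== PORT A =====
-- one step of A's edge loops: grow the dict if the id is unseen, then append its number
def pvAStep (st : PySem.Dict Int Int × List Int) (node_id : Int) : PySem.Dict Int Int × List Int :=
  let d := if st.1.contains node_id then st.1 else st.1.insert node_id (PySem.Dict.size st.1)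
  (d, st.2 ++ [d.getD node_id 0])

def normalize_node_id (src_edges : List Int) (dst_edges : List Int) (node_features : List (String × List Int)) : List Int × List Int × (List (Int × List Int)) :=
  let st1 := src_edges.foldl pvAStep (PySem.Dict.empty, [])
  let st2 := dst_edges.foldl pvAStep (st1.1, [])
  let norm_feat := node_features.foldl (fun (nf : PySem.Dict Int (List Int)) kv =>
      match PySem.Int.ofStr? kv.1 with          -- int(key); none = ValueError, excluded by Pre_
      | none => nf
      | some n =>
        match st2.1.get? n with                 -- normalized_dict[int(key)]; none = KeyError, excluded by Pre_
        | none => nf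
        | some m => nf.insert m kv.2) PySem.Dict.empty
  (st1.2, st2.2, norm_feat.items)

-- ===== PORT B =====
def normalize_node_id_alt (src_edges : List Int) (dst_edges : List Int) (node_features : List (String × List Int)) : List Int × List Int × (List (Int × List Int)) :=
  let chain := src_edges ++ dst_edges
  let first : PySem.Dict Int Int :=              -- for i in range(len(chain)-1, -1, -1): first[chain[i]] = i
    (PySem.List.pyRange ((chain.length : Int) - 1) (-1) (-1)).foldl
      (fun d i => d.insert (PySem.List.pyGetD chain i 0) i) PySem.Dict.empty
  let order := PySem.List.sorted first.keys (fun n => first.getD n 0)   -- sorted(first, key=first.get)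
  let rank : PySem.Dict Int Int :=
    (PySem.List.enumerate order).foldl (fun d p => d.insert p.2 p.1) PySem.Dict.empty
  let norm_src := src_edges.map (fun n => rank.getD n 0)   -- rank[n]; edge nodes are always ranked
  let norm_dst := dst_edges.map (fun n => rank.getD n 0)
  let norm_feat := node_features.foldl (fun (nf : PySem.Dict Int (List Int)) kv =>
      match PySem.Int.ofStr? kv.1 with          -- int(k); none = ValueError, excluded by Pre_
      | none => nf
      | some n => nf.insert (rank.getD n 0) kv.2) PySem.Dict.empty   -- rank[int(k)]; KeyError excluded by Pre_
  (norm_src, norm_dst, norm_feat.items)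

-- ===== PRECONDITION & SPEC =====
-- Pre_ excludes exactly the inputs where A (and B alike) raises: a feature key that is not an
-- int literal (ValueError) or whose int value occurs in neither edge list (KeyError).
def Pre_normalize_node_id (src_edges : List Int) (dst_edges : List Int) (node_features : List (String × List Int)) : Prop :=
  node_features.all (fun kv =>
    match PySem.Int.ofStr? kv.1 with
    | none => false
    | some n => (src_edges ++ dst_edges).contains n) = true
instance (src_edges : List Int) (dst_edges : List Int) (node_features : List (String × List Int)) : Decidable (Pre_normalize_node_id src_edges dst_edges node_features) := by unfold Pre_normalize_node_id; infer_instance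

def pvWitness_normalize_node_id : List Int × List Int × (List (String × List Int)) :=
  ([1, 3, 1], [3, 5], [("3", [7, 8]), ("5", [])])

def Spec_normalize_node_id (src_edges : List Int) (dst_edges : List Int) (node_features : List (String × List Int)) (out : List Int × List Int × (List (Int × List Int))) : Prop := out = normalize_node_id_alt src_edges dst_edges node_features
instance (src_edges : List Int) (dst_edges : List Int) (node_features : List (String × List Int)) (out : List Int × List Int × (List (Int × List Int))) : Decidable (Spec_normalize_node_id src_edges dst_edges node_features out) := by unfold Spec_normalize_node_id; infer_instance

-- ===== CLAIM (what is proved, stated in full; the proofs are below) =====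
def Claim_equal_normalize_node_id : Prop := ∀ (src_edges : List Int) (dst_edges : List Int) (node_features : List (String × List Int)), Dom_normalize_node_id src_edges dst_edges node_features → Pre_normalize_node_id src_edges dst_edges node_features → Spec_normalize_node_id src_edges dst_edges node_features (normalize_node_id src_edges dst_edges node_features)

-- ===== LEMMAS AND PROOFS =====

-- the dict {n : rank} built by B from the ordered distinct-id list S
def pvEDict (S : List Int) : PySem.Dict Int Int :=
  (PySem.List.enumerate S).foldl (fun d p => d.insert p.2 p.1) PySem.Dict.empty

lemma pvEDict_items (S : List Int) (hS : S.Nodup) :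
    (pvEDict S).items = (PySem.List.enumerate S 0).map (fun p => (p.2, p.1)) := by
  have h := PySem.Dict.items_foldl_insert_fresh (PySem.List.enumerate S 0)
      (fun p => p.2) (fun p => p.1) (PySem.Dict.empty)
      (fun a _ => PySem.Dict.contains_empty a.2)
      (by rw [PySem.List.map_snd_enumerate]; exact hS)
  simpa [pvEDict] using h

lemma pvEDict_keys (S : List Int) (hS : S.Nodup) : (pvEDict S).keys = S := by
  show (pvEDict S).items.map (·.1) = S
  rw [pvEDict_items S hS, List.map_map]
  exact PySem.List.map_snd_enumerate S 0

lemma pvEDict_get?_of_mem (S : List Int) (hS : S.Nodup) {n : Int} (h : n ∈ S) :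
    (pvEDict S).get? n = some (List.idxOf n S : Int) := by
  apply PySem.Dict.get?_of_mem_items
  · rw [pvEDict_items S hS]
    refine List.mem_map.mpr ⟨((List.idxOf n S : Int), n), ?_, rfl⟩
    rw [PySem.List.mem_enumerate_iff]
    exact ⟨List.idxOf n S, List.idxOf_lt_length_of_mem h,
      by simp [List.getElem_idxOf (List.idxOf_lt_length_of_mem h)]⟩
  · rw [pvEDict_keys S hS]; exact hS

lemma pvEDict_getD_of_mem (S : List Int) (hS : S.Nodup) {n : Int} (h : n ∈ S) :
    (pvEDict S).getD n 0 = (List.idxOf n S : Int) := by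
  rw [PySem.Dict.getD_eq_get?_getD, pvEDict_get?_of_mem S hS h]; rfl

lemma pvEDict_contains (S : List Int) (hS : S.Nodup) (n : Int) :
    (pvEDict S).contains n = decide (n ∈ S) := by
  rw [PySem.Dict.contains_eq_decide_mem_keys, pvEDict_keys S hS]

lemma pvEDict_size (S : List Int) (hS : S.Nodup) : (pvEDict S).size = S.length := by
  show (pvEDict S).items.length = S.length
  rw [pvEDict_items S hS, List.length_map, PySem.List.length_enumerate]

lemma pvEDict_append_singleton (S : List Int) (x : Int) :
    pvEDict (S ++ [x]) = (pvEDict S).insert x (S.length : Int) := by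
  unfold pvEDict
  rw [PySem.List.enumerate_append, List.foldl_append]
  simp [PySem.List.enumerate_cons, PySem.List.enumerate_nil]

lemma pvAdd_nodup (S : List Int) (x : Int) (hS : S.Nodup) : (PySem.Set.add S x).Nodup := by
  show (if S.contains x then S else S ++ [x]).Nodup
  by_cases hx : x ∈ S
  · simpa [hx]
  · have hc : S.contains x = false := by simpa using hx
    simp only [hc, Bool.false_eq_true, if_false]
    exact List.Nodup.append hS (List.nodup_singleton x) (by simpa using hx)

lemma pvAdd_eq_of_mem {S : List Int} {x : Int} (hx : x ∈ S) : PySem.Set.add S x = S := by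
  show (if S.contains x then S else S ++ [x]) = S
  simp [hx]

lemma pvAdd_eq_of_not_mem {S : List Int} {x : Int} (hx : x ∉ S) :
    PySem.Set.add S x = S ++ [x] := by
  show (if S.contains x then S else S ++ [x]) = S ++ [x]
  simp [hx]

lemma pvIdxOf_add {S : List Int} {n : Int} (x : Int) (h : n ∈ S) :
    List.idxOf n (PySem.Set.add S x) = List.idxOf n S := by
  by_cases hx : x ∈ S
  · rw [pvAdd_eq_of_mem hx]
  · rw [pvAdd_eq_of_not_mem hx, List.idxOf_append, if_pos h]

lemma pvMem_update_of_mem {S : List Int} {n : Int} (xs : List Int) (h : n ∈ S) :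
    n ∈ PySem.Set.update S xs := by
  induction xs generalizing S with
  | nil => exact h
  | cons x xs ih =>
    exact ih ((PySem.Set.mem_add S x n).mpr (Or.inl h))

lemma pvMem_update_of_mem_list {xs : List Int} {n : Int} (S : List Int) (h : n ∈ xs) :
    n ∈ PySem.Set.update S xs := by
  induction xs generalizing S with
  | nil => cases h
  | cons x xs ih =>
    rcases List.mem_cons.mp h with rfl | h'
    · exact pvMem_update_of_mem xs ((PySem.Set.mem_add S n n).mpr (Or.inr rfl))
    · exact ih _ h'

lemma pvIdxOf_update {S : List Int} {n : Int} (xs : List Int) (h : n ∈ S) :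
    List.idxOf n (PySem.Set.update S xs) = List.idxOf n S := by
  induction xs generalizing S with
  | nil => rfl
  | cons x xs ih =>
    have h' : n ∈ PySem.Set.add S x := (PySem.Set.mem_add S x n).mpr (Or.inl h)
    calc List.idxOf n (PySem.Set.update (PySem.Set.add S x) xs)
        = List.idxOf n (PySem.Set.add S x) := ih h'
      _ = List.idxOf n S := pvIdxOf_add x h

lemma pvUpdate_nodup (xs : List Int) (S : List Int) (hS : S.Nodup) :
    (PySem.Set.update S xs).Nodup := by
  induction xs generalizing S with
  | nil => exact hS
  | cons x xs ih => exact ih _ (pvAdd_nodup S x hS)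

lemma pvAStep_eq (S : List Int) (acc : List Int) (x : Int) (hS : S.Nodup) :
    pvAStep (pvEDict S, acc) x =
      (pvEDict (PySem.Set.add S x), acc ++ [(List.idxOf x (PySem.Set.add S x) : Int)]) := by
  by_cases hx : x ∈ S
  · have hc : (pvEDict S).contains x = true := by
      rw [pvEDict_contains S hS]; simpa
    rw [pvAdd_eq_of_mem hx]
    simp [pvAStep, hc, pvEDict_getD_of_mem S hS hx]
  · have hc : (pvEDict S).contains x = false := by
      rw [pvEDict_contains S hS]; simpa
    rw [pvAdd_eq_of_not_mem hx]
    have hmem : x ∈ S ++ [x] := List.mem_append_right _ (List.mem_singleton.mpr rfl)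
    have hnd : (S ++ [x]).Nodup :=
      List.Nodup.append hS (List.nodup_singleton x) (by simpa using hx)
    have hidx : List.idxOf x (S ++ [x]) = S.length := by
      rw [List.idxOf_append, if_neg hx]; simp
    simp only [pvAStep, hc, Bool.false_eq_true, if_false, pvEDict_size S hS,
      ← pvEDict_append_singleton S x, pvEDict_getD_of_mem (S ++ [x]) hnd hmem, hidx]

lemma pvLoopA (xs : List Int) (S : List Int) (acc : List Int) (hS : S.Nodup) :
    xs.foldl pvAStep (pvEDict S, acc) =
      (pvEDict (PySem.Set.update S xs),
       acc ++ xs.map (fun n => (List.idxOf n (PySem.Set.update S xs) : Int))) := by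
  induction xs generalizing S acc with
  | nil => simp [PySem.Set.update]
  | cons x xs ih =>
    have hxmem : x ∈ PySem.Set.add S x := (PySem.Set.mem_add S x x).mpr (Or.inr rfl)
    rw [List.foldl_cons, pvAStep_eq S acc x hS, ih (PySem.Set.add S x) _ (pvAdd_nodup S x hS)]
    have hupd : PySem.Set.update S (x :: xs) = PySem.Set.update (PySem.Set.add S x) xs := rfl
    rw [hupd, List.map_cons, pvIdxOf_update xs hxmem]
    simp

-- ===== B-side lemmas: the reverse first-occurrence scan and the sort =====

-- the dict {n : first-occurrence index of n in cs} built by B's reverse scan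
def pvFDict (cs : List Int) : PySem.Dict Int Int :=
  (PySem.List.pyRange ((cs.length : Int) - 1) (-1) (-1)).foldl
    (fun d i => d.insert (PySem.List.pyGetD cs i 0) i) PySem.Dict.empty

lemma pvFDict_eq (cs : List Int) :
    (PySem.List.pyRange ((cs.length : Int) - 1) (-1) (-1)).foldl
      (fun d i => d.insert (PySem.List.pyGetD cs i 0) i) PySem.Dict.empty = pvFDict cs := rfl

lemma pvRevFold_get? (cs : List Int) (k : Nat) (hk : k ≤ cs.length) (d : PySem.Dict Int Int) (n : Int) :
    ((PySem.List.pyRange ((k : Int) - 1) (-1) (-1)).foldl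
        (fun d i => d.insert (PySem.List.pyGetD cs i 0) i) d).get? n
      = if n ∈ cs.take k then some ((List.idxOf n (cs.take k) : Int)) else d.get? n := by
  induction k generalizing d with
  | zero =>
    rw [PySem.List.pyRange_neg_one_eq_nil (by norm_num)]
    simp
  | succ k ih =>
    have hkl : k < cs.length := hk
    have h1 : ((k + 1 : Nat) : Int) - 1 = (k : Int) := by push_cast; ring
    rw [h1, PySem.List.pyRange_neg_one_cons (by omega), List.foldl_cons, ih (le_of_lt hkl)]
    have hget : PySem.List.pyGetD cs (k : Int) 0 = cs[k] := by
      rw [PySem.List.pyGetD_natCast, List.getD_eq_getElem?_getD, List.getElem?_eq_getElem hkl]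
      rfl
    have htake : cs.take (k + 1) = cs.take k ++ [cs[k]] := by
      rw [List.take_add_one]
      simp [List.getElem?_eq_getElem hkl]
    rw [hget, PySem.Dict.get?_insert]
    by_cases hmem : n ∈ cs.take k
    · rw [if_pos hmem, if_pos (htake ▸ List.mem_append_left _ hmem), htake,
        List.idxOf_append, if_pos hmem]
    · by_cases hx : n = cs[k]
      · subst hx
        rw [if_neg hmem, if_pos rfl,
          if_pos (htake ▸ List.mem_append_right _ (List.mem_singleton.mpr rfl)), htake,
          List.idxOf_append, if_neg hmem]
        simp [List.length_take, Nat.min_eq_left (le_of_lt hkl)]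
      · rw [if_neg hmem, if_neg hx, if_neg (by
          intro hcon
          rw [htake] at hcon
          rcases List.mem_append.mp hcon with h | h
          · exact hmem h
          · exact hx (List.mem_singleton.mp h))]

lemma pvFDict_get?_of_mem (cs : List Int) {n : Int} (h : n ∈ cs) :
    (pvFDict cs).get? n = some ((List.idxOf n cs : Int)) := by
  have hh := pvRevFold_get? cs cs.length le_rfl PySem.Dict.empty n
  rw [List.take_length] at hh
  unfold pvFDict
  rw [hh, if_pos h]

lemma pvFDict_getD_of_mem (cs : List Int) {n : Int} (h : n ∈ cs) :
    (pvFDict cs).getD n 0 = (List.idxOf n cs : Int) := by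
  rw [PySem.Dict.getD_eq_get?_getD, pvFDict_get?_of_mem cs h]; rfl

lemma pvFDict_keys (cs : List Int) : (pvFDict cs).keys = PySem.Set.ofList cs.reverse := by
  have h := PySem.Dict.keys_foldl_insert_key
      (PySem.List.pyRange ((cs.length : Int) - 1) (-1) (-1))
      (fun i => PySem.List.pyGetD cs i 0) (fun _ i => i) (PySem.Dict.empty (ν := Int))
  have hrev : PySem.List.pyRange ((cs.length : Int) - 1) (-1) (-1)
      = (PySem.List.pyRange 0 (cs.length : Int)).reverse := by
    rw [PySem.List.pyRange_neg_one_eq_reverse]; norm_num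
  rw [hrev, List.map_reverse, PySem.List.map_pyGetD_pyRange_zero'] at h
  unfold pvFDict
  rw [hrev]
  rw [h, PySem.Dict.keys_empty, PySem.Set.ofList_eq_foldl]
  rfl

lemma pvFDict_keys_perm (cs : List Int) : (PySem.List.dedup cs).Perm (pvFDict cs).keys := by
  rw [PySem.List.dedup_eq_ofList, pvFDict_keys]
  refine (List.perm_ext_iff_of_nodup (PySem.Set.nodup_ofList cs)
      (PySem.Set.nodup_ofList cs.reverse)).mpr ?_
  intro a
  rw [PySem.Set.mem_ofList, PySem.Set.mem_ofList, List.mem_reverse]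

lemma pvDedup_pairwise (cs : List Int) :
    (PySem.List.dedup cs).Pairwise (fun a b => List.idxOf a cs < List.idxOf b cs) := by
  induction cs using List.reverseRecOn with
  | nil => simp [PySem.List.dedup]
  | append_singleton t x ih =>
    have hdt : PySem.List.dedup (t ++ [x]) = PySem.Set.add (PySem.List.dedup t) x := by
      rw [PySem.List.dedup_eq_ofList, PySem.List.dedup_eq_ofList, PySem.Set.ofList_eq_foldl,
        PySem.Set.ofList_eq_foldl, List.foldl_append]
      rfl
    have hmemd : ∀ {a : Int}, a ∈ PySem.List.dedup t → a ∈ t := by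
      intro a ha
      rw [PySem.List.dedup_eq_ofList] at ha
      exact (PySem.Set.mem_ofList t a).mp ha
    have htrans : (PySem.List.dedup t).Pairwise
        (fun a b => List.idxOf a (t ++ [x]) < List.idxOf b (t ++ [x])) := by
      refine ih.imp_of_mem ?_
      intro a b ha hb hab
      rw [List.idxOf_append, if_pos (hmemd ha), List.idxOf_append, if_pos (hmemd hb)]
      exact hab
    rw [hdt]
    by_cases hx : x ∈ PySem.List.dedup t
    · rw [pvAdd_eq_of_mem hx]
      exact htrans
    · rw [pvAdd_eq_of_not_mem hx, List.pairwise_append]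
      have hx' : x ∉ t := fun h => hx (by
        rw [PySem.List.dedup_eq_ofList]; exact (PySem.Set.mem_ofList t x).mpr h)
      refine ⟨htrans, List.pairwise_singleton _ _, ?_⟩
      intro a ha b hb
      rw [List.mem_singleton] at hb
      subst hb
      rw [List.idxOf_append, if_pos (hmemd ha), List.idxOf_append, if_neg hx']
      have hlt : List.idxOf a t < t.length := List.idxOf_lt_length_of_mem (hmemd ha)
      omega

lemma pvOrder_eq (cs : List Int) :
    PySem.List.sorted (pvFDict cs).keys (fun n => (pvFDict cs).getD n 0) = PySem.List.dedup cs := by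
  apply PySem.List.sorted_eq_of_perm_of_pairwise_lt _ _ _ (pvFDict_keys_perm cs)
  refine (pvDedup_pairwise cs).imp_of_mem ?_
  intro a b ha hb hab
  have hmemd : ∀ {y : Int}, y ∈ PySem.List.dedup cs → y ∈ cs := by
    intro y hy
    rw [PySem.List.dedup_eq_ofList] at hy
    exact (PySem.Set.mem_ofList cs y).mp hy
  rw [pvFDict_getD_of_mem cs (hmemd ha), pvFDict_getD_of_mem cs (hmemd hb)]
  exact_mod_cast hab

-- ===== VERDICT =====
theorem normalize_node_id_spec : Claim_equal_normalize_node_id := by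
  intro src dst feats _ hpre
  unfold Spec_normalize_node_id normalize_node_id normalize_node_id_alt
  simp only []
  have hpre' := List.all_eq_true.mp hpre
  set S1 := PySem.Set.update [] src with hS1def
  set S2 := PySem.Set.update S1 dst with hS2def
  have hS1 : S1.Nodup := pvUpdate_nodup src [] List.nodup_nil
  have hS2 : S2.Nodup := pvUpdate_nodup dst S1 hS1
  have hofList : PySem.Set.ofList (src ++ dst) = S2 := by
    rw [PySem.Set.ofList_eq_foldl, List.foldl_append]; rfl
  rw [pvFDict_eq (src ++ dst)]
  have horder : PySem.List.sorted (pvFDict (src ++ dst)).keys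
      (fun n => (pvFDict (src ++ dst)).getD n 0) = S2 := by
    rw [pvOrder_eq, PySem.List.dedup_eq_ofList, hofList]
  rw [horder]
  have hrank : List.foldl (fun (d : PySem.Dict Int Int) p => d.insert p.2 p.1)
      PySem.Dict.empty (PySem.List.enumerate S2) = pvEDict S2 := rfl
  rw [hrank]
  have h0 : (PySem.Dict.empty : PySem.Dict Int Int) = pvEDict [] := rfl
  rw [h0, pvLoopA src [] [] List.nodup_nil, ← hS1def]
  rw [pvLoopA dst S1 [] hS1, ← hS2def]
  have hmemS2 : ∀ {n : Int}, n ∈ src ++ dst → n ∈ S2 := by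
    intro n hn
    rw [← hofList]; exact (PySem.Set.mem_ofList _ n).mpr hn
  dsimp only
  simp only [List.nil_append]
  refine congrArg₂ Prod.mk ?_ (congrArg₂ Prod.mk ?_ ?_)
  · -- norm_src
    refine List.map_congr_left (fun n hn => ?_)
    have hn1 : n ∈ S1 := pvMem_update_of_mem_list [] hn
    rw [pvEDict_getD_of_mem S2 hS2 (pvMem_update_of_mem dst hn1), hS2def, pvIdxOf_update dst hn1]
  · -- norm_dst
    refine List.map_congr_left (fun n hn => ?_)
    exact (pvEDict_getD_of_mem S2 hS2 (pvMem_update_of_mem_list S1 hn)).symm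
  · -- norm_feat
    refine congrArg PySem.Dict.items (PySem.List.foldl_congr_mem' feats _ _ _ (fun kv hkv nf => ?_))
    have hk := hpre' kv hkv
    revert hk
    cases hof : PySem.Int.ofStr? kv.1 with
    | none => intro hk; exact absurd hk (by simp)
    | some n =>
      intro hk
      have hn : n ∈ src ++ dst := by
        have : (src ++ dst).contains n = true := by simpa using hk
        simpa using this
      simp only [pvEDict_get?_of_mem S2 hS2 (hmemS2 hn),
        pvEDict_getD_of_mem S2 hS2 (hmemS2 hn)]
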